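-- pv_equiv track=rewrite | github.com/yichenchong/competitive_programming | Google Code Jam/Code Jam 2020/1B/expogo.py | tryHit
-- ===== SOURCE A (Python) =====
-- dire = ["E", "W", "S", "N"]
--
-- def impossible(distance, steps):
-- 	distance = abs(distance)
-- 	return distance - ((distance >> (steps - 1)) << (steps - 1)) != 0
--
-- def tryHit(target, step, maxi):
-- 	jumpDist = 2 ** (step - 1)
-- 	if tuple(target) == (0,0):
-- 		return ""
-- 	if impossible(abs(target[0]), step) or impossible(abs(target[1]), step):
-- 		return None
-- 	if(step > maxi):
-- 		return None
-- 	tries = []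
-- 	tryEast = tryHit([target[0] - jumpDist,target[1]], step + 1, maxi)
-- 	tryWest = tryHit([target[0] + jumpDist,target[1]], step + 1, maxi)
-- 	trySouth = tryHit([target[0],target[1] - jumpDist], step + 1, maxi)
-- 	tryNorth = tryHit([target[0],target[1] + jumpDist], step + 1, maxi)
-- 	tries = [tryEast, tryWest, tryNorth, trySouth]
-- 	mini = None
-- 	minij = None
-- 	for j, i in enumerate(tries):
-- 		if mini == None:
-- 			mini = i
-- 			minij = j
-- 		elif i != None and len(i) < len(mini):
-- 			mini = i
-- 			minij = j
-- 	if mini == None: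
-- 		return None
-- 	return dire[minij] + mini
-- ===== SOURCE B (Python) =====
-- def tryHit(target, step, maxi):
--     # Greedy: at each step the bit pattern forces the axis, and the sign is forced
--     # by the parity needed at the next step (or finishes outright), so the answer
--     # is built along a single path instead of a 4-way search.
--     x, y = target[0], target[1]
--     if x == 0 and y == 0:
--         return ""
--     j = 2 ** (step - 1)
--     if x % j != 0 or y % j != 0:
--         return None
--     if step > maxi:
--         return None
--     xo = (x // j) % 2
--     yo = (y // j) % 2
--     if xo == yo:
--         # both coordinates odd, or both even (and not at the origin): no single
--         # jump on one axis can make both divisible by the next power of two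
--         return None
--     if xo == 1:
--         if y == 0 and x == j:
--             return "E"
--         if y == 0 and x == -j:
--             return "W"
--         if ((x - j) // (2 * j) + y // (2 * j)) % 2 == 1:
--             rest = tryHit([x - j, y], step + 1, maxi)
--             return None if rest is None else "E" + rest
--         else:
--             rest = tryHit([x + j, y], step + 1, maxi)
--             return None if rest is None else "W" + rest
--     else:
--         if x == 0 and y == j:
--             return "N"
--         if x == 0 and y == -j:
--             return "S"
--         if ((y - j) // (2 * j) + x // (2 * j)) % 2 == 1:
--             rest = tryHit([x, y - j], step + 1, maxi)
--             return None if rest is None else "N" + rest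
--         else:
--             rest = tryHit([x, y + j], step + 1, maxi)
--             return None if rest is None else "S" + rest
-- ===== Notes on version B (the rewrite author's own statement) =====
-- stated objective: alternative
-- what changed: Replaces A's 4-way recursive search with a per-step min-by-length scan by a greedy single-path construction: the low bit of the scaled coordinates forces the axis, and the parity needed at the next step (or an immediate finish) forces the sign, so exactly one recursive call is made per step.
-- intended difference: On targets with three or more coordinates whose first two are 0,0 A returns None, because its base case compares the whole list against the 2-tuple (0,0) and so never fires, while B returns "" (the empty move sequence), the intended answer for a target that is already hit; everywhere else A only ever reads the first two coordinates. — e.g. on tryHit([0, 0, 0], 1, 1): A returns none, B returns some ""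
-- outside the precondition, e.g. on tryHit([3], 2, 5): A returns None, B raises IndexError
import Mathlib
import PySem

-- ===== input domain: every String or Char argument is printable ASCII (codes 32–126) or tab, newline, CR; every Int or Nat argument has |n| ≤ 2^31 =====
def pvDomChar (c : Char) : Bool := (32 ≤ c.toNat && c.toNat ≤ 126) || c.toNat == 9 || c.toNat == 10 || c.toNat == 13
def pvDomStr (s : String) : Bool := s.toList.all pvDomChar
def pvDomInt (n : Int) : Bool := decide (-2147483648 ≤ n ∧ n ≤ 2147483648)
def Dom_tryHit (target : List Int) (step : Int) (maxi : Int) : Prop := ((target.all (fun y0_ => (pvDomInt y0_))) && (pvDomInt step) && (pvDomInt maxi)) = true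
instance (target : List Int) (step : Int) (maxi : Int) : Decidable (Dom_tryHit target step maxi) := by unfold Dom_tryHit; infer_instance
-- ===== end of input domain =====

-- B replaces A's 4-way recursive search (min-by-length over the four directions) by the
-- greedy single-path construction: parity forces the axis, the next step's parity forces
-- the sign, so one recursive call is made per step (objective: alternative).
-- Equivalence is about return values; neither program mutates its arguments.

-- ===== PORT A =====
-- same-module constant
def dire : List String := ["E", "W", "S", "N"]

-- 'd >> k << k' on d = |distance| ≥ 0 is (d / 2^k) * 2^k, exact here since the shift amount
-- (steps - 1).toNat matches Python's steps - 1 on all admitted inputs (steps ≥ 1)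
def impossible (distance : Int) (steps : Int) : Bool :=
  let d : Int := (distance.natAbs : Int)   -- abs(distance), exact
  decide (d - d / 2 ^ (steps - 1).toNat * 2 ^ (steps - 1).toNat ≠ 0)

-- the 'for j, i in enumerate(tries)' minimum scan, state = (mini, minij)
def scanMin (st : Option String × Option Int) (ji : Int × Option String) :
    Option String × Option Int :=
  match st with
  | (none, _) => (ji.2, some ji.1)
  | (some m, mj) =>
    match ji.2 with
    | some i => if PySem.Str.len i < PySem.Str.len m then (some i, some ji.1) else (some m, mj)
    | none => (some m, mj)

-- fuel is only a structural-termination guard: every call made with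
-- fuel ≥ (maxi - step + 1).toNat never reaches the fuel-0 branch
def tryHitF : Nat → List Int → Int → Int → Option String
  | fuel, target, step, maxi =>
    let jumpDist : Int := 2 ^ (step - 1).toNat   -- 2 ** (step - 1); exact for step ≥ 1
    if target = [0, 0] then some "" else
    let x := PySem.List.pyGetD target 0 0   -- target[0]; in range on admitted inputs
    let y := PySem.List.pyGetD target 1 0   -- target[1]
    if impossible (x.natAbs : Int) step || impossible (y.natAbs : Int) step then none else   -- abs(target[i]), exact
    if step > maxi then none else
    match fuel with
    | 0 => none   -- unreachable with enough fuel
    | fuel' + 1 =>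
      let tryEast := tryHitF fuel' [x - jumpDist, y] (step + 1) maxi
      let tryWest := tryHitF fuel' [x + jumpDist, y] (step + 1) maxi
      let trySouth := tryHitF fuel' [x, y - jumpDist] (step + 1) maxi
      let tryNorth := tryHitF fuel' [x, y + jumpDist] (step + 1) maxi
      let tries := [tryEast, tryWest, tryNorth, trySouth]
      match (PySem.List.enumerate tries).foldl scanMin (none, none) with
      | (none, _) => none
      | (some m, mj) =>
        -- dire[minij] + mini; minij is always set alongside mini, so the default is never read
        some ((PySem.List.pyGet? dire (mj.getD 0)).getD "" ++ m)

def tryHit (target : List Int) (step : Int) (maxi : Int) : Option String :=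
  tryHitF (maxi - step + 1).toNat target step maxi

-- ===== PORT B =====
-- fuel is only a structural-termination guard, as for tryHitF
def tryHitAltF : Nat → List Int → Int → Int → Option String
  | fuel, target, step, maxi =>
    let x := PySem.List.pyGetD target 0 0   -- target[0]; in range on admitted inputs
    let y := PySem.List.pyGetD target 1 0   -- target[1]
    if x = 0 ∧ y = 0 then some "" else
    let j : Int := 2 ^ (step - 1).toNat     -- 2 ** (step - 1); exact for step ≥ 1
    if PySem.Int.mod x j ≠ 0 ∨ PySem.Int.mod y j ≠ 0 then none else
    if step > maxi then none else
    let xo := PySem.Int.mod (PySem.Int.floordiv x j) 2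
    let yo := PySem.Int.mod (PySem.Int.floordiv y j) 2
    if xo = yo then none else
    match fuel with
    | 0 => none   -- unreachable with enough fuel
    | fuel' + 1 =>
      if xo = 1 then
        if y = 0 ∧ x = j then some "E"
        else if y = 0 ∧ x = -j then some "W"
        else if PySem.Int.mod (PySem.Int.floordiv (x - j) (2 * j) + PySem.Int.floordiv y (2 * j)) 2 = 1 then
          match tryHitAltF fuel' [x - j, y] (step + 1) maxi with
          | none => none
          | some rest => some ("E" ++ rest)
        else
          match tryHitAltF fuel' [x + j, y] (step + 1) maxi with
          | none => none
          | some rest => some ("W" ++ rest)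
      else
        if x = 0 ∧ y = j then some "N"
        else if x = 0 ∧ y = -j then some "S"
        else if PySem.Int.mod (PySem.Int.floordiv (y - j) (2 * j) + PySem.Int.floordiv x (2 * j)) 2 = 1 then
          match tryHitAltF fuel' [x, y - j] (step + 1) maxi with
          | none => none
          | some rest => some ("N" ++ rest)
        else
          match tryHitAltF fuel' [x, y + j] (step + 1) maxi with
          | none => none
          | some rest => some ("S" ++ rest)

def tryHit_alt (target : List Int) (step : Int) (maxi : Int) : Option String :=
  tryHitAltF (maxi - step + 1).toNat target step maxi

-- ===== PRECONDITION & SPEC =====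
-- Pre_ restricts to the natural domain: targets with at least two coordinates (on shorter
-- lists A raises IndexError, except when it short-circuits to None before reading target[1],
-- where B's unconditional two-coordinate read raises instead) and step ≥ 1 (for step < 1, A
-- raises ValueError on a negative shift count); target = [0,0], which returns "" for any
-- step, stays inside.
def Pre_tryHit (target : List Int) (step : Int) (maxi : Int) : Prop :=
  2 ≤ target.length ∧ (1 ≤ step ∨ target = [0, 0])
instance (target : List Int) (step : Int) (maxi : Int) : Decidable (Pre_tryHit target step maxi) := by
  unfold Pre_tryHit; infer_instance

def pvWitness_tryHit : List Int × Int × Int := ([1, 0], 1, 3)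

-- On targets with three or more coordinates whose first two are 0,0 A returns None (its base
-- case compares the whole list against the 2-tuple (0,0), so it never fires), while B returns
-- "" — the intended answer for a target that is already hit; everywhere else A only ever
-- reads the first two coordinates.
def D_tryHit (target : List Int) (step : Int) (maxi : Int) : Prop :=
  3 ≤ target.length ∧ target.getD 0 0 = 0 ∧ target.getD 1 0 = 0
instance (target : List Int) (step : Int) (maxi : Int) : Decidable (D_tryHit target step maxi) := by
  unfold D_tryHit; infer_instance

def Spec_tryHit (target : List Int) (step : Int) (maxi : Int) (out : Option String) : Prop :=
  ¬ D_tryHit target step maxi → out = tryHit_alt target step maxi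
instance (target : List Int) (step : Int) (maxi : Int) (out : Option String) : Decidable (Spec_tryHit target step maxi out) := by
  unfold Spec_tryHit; infer_instance

def pvDiffWitness_tryHit : List Int × Int × Int := ([0, 0, 0], 1, 1)
def pvDiffWitnessOut_tryHit : (Option String) × (Option String) := (none, some "")

-- ===== CLAIM (what is proved, stated in full; the proofs are below) =====
def Claim_unchanged_tryHit : Prop := ∀ (target : List Int) (step : Int) (maxi : Int), Dom_tryHit target step maxi → Pre_tryHit target step maxi → Spec_tryHit target step maxi (tryHit target step maxi)
def Claim_changed_tryHit : Prop := Dom_tryHit (pvDiffWitness_tryHit.1) (pvDiffWitness_tryHit.2.1) (pvDiffWitness_tryHit.2.2) ∧ Pre_tryHit (pvDiffWitness_tryHit.1) (pvDiffWitness_tryHit.2.1) (pvDiffWitness_tryHit.2.2) ∧ D_tryHit (pvDiffWitness_tryHit.1) (pvDiffWitness_tryHit.2.1) (pvDiffWitness_tryHit.2.2) ∧ tryHit (pvDiffWitness_tryHit.1) (pvDiffWitness_tryHit.2.1) (pvDiffWitness_tryHit.2.2) = pvDiffWitnessOut_tryHit.1 ∧ tryHit_alt (pvDiffWitness_tryHit.1)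 (pvDiffWitness_tryHit.2.1) (pvDiffWitness_tryHit.2.2) = pvDiffWitnessOut_tryHit.2 ∧ pvDiffWitnessOut_tryHit.1 ≠ pvDiffWitnessOut_tryHit.2
def Claim_exact_tryHit : Prop := ∀ (target : List Int) (step : Int) (maxi : Int), Dom_tryHit target step maxi → Pre_tryHit target step maxi → D_tryHit target step maxi → tryHit target step maxi ≠ tryHit_alt target step maxi

-- ===== LEMMAS AND PROOFS =====
-- ===== LEMMAS AND PROOFS =====
lemma pvGetD_zero (a d : Int) (l : List Int) : PySem.List.pyGetD (a :: l) 0 d = a := by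
  rw [show (0:Int) = ((0:Nat):Int) from rfl, PySem.List.pyGetD_natCast]; rfl

lemma pvGetD_one (a b d : Int) (l : List Int) : PySem.List.pyGetD (a :: b :: l) 1 d = b := by
  rw [show (1:Int) = ((1:Nat):Int) from rfl, PySem.List.pyGetD_natCast]; rfl

lemma pvImp_iff (d s : Int) : impossible d s = true ↔ ¬ ((2:Int) ^ (s - 1).toNat ∣ d) := by
  unfold impossible
  simp only [decide_eq_true_eq]
  have h0 : (d.natAbs:Int) - (d.natAbs:Int) / 2 ^ (s-1).toNat * 2 ^ (s-1).toNat
      = (d.natAbs:Int) % 2 ^ (s-1).toNat := by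
    rw [Int.emod_def]; ring
  rw [h0]
  constructor
  · intro h hdvd; exact h (Int.emod_eq_zero_of_dvd ((Int.dvd_natAbs).mpr hdvd))
  · intro h hmod; exact h ((Int.dvd_natAbs).mp (Int.dvd_of_emod_eq_zero hmod))

lemma pvImp_false (d s : Int) (h : (2:Int) ^ (s - 1).toNat ∣ d) :
    impossible ((d.natAbs : Int)) s = false := by
  rw [← Bool.not_eq_true, pvImp_iff]
  simp only [Int.dvd_natAbs, not_not]
  exact h

lemma pvImp_true (d s : Int) (h : ¬ (2:Int) ^ (s - 1).toNat ∣ d) :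
    impossible ((d.natAbs : Int)) s = true := by
  rw [pvImp_iff]; simpa [Int.dvd_natAbs] using h

lemma A_zero (f : Nat) (s m : Int) : tryHitF f [0, 0] s m = some "" := by
  rw [tryHitF]; rfl

lemma A_guard (f : Nat) (target : List Int) (s m : Int) (hne : target ≠ [0, 0])
    (h : ¬ (2:Int) ^ (s - 1).toNat ∣ PySem.List.pyGetD target 0 0 ∨
         ¬ (2:Int) ^ (s - 1).toNat ∣ PySem.List.pyGetD target 1 0) :
    tryHitF f target s m = none := by
  rw [tryHitF]
  rw [if_neg hne]
  rcases h with h | h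
  · simp only [pvImp_true _ _ h, Bool.true_or, reduceIte]
  · simp only [pvImp_true _ _ h, Bool.or_true, reduceIte]

lemma A_gt (f : Nat) (target : List Int) (s m : Int) (hne : target ≠ [0, 0])
    (hgt : m < s) : tryHitF f target s m = none := by
  rw [tryHitF]
  rw [if_neg hne]
  cases hb : (impossible ((PySem.List.pyGetD target 0 0).natAbs : Int) s
      || impossible ((PySem.List.pyGetD target 1 0).natAbs : Int) s)
  · simp only [hb, Bool.false_eq_true, reduceIte, if_pos (show s > m from hgt)]
  · simp only [hb, reduceIte]

def pick4 (tries : List (Option String)) : Option String :=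
  match (PySem.List.enumerate tries).foldl scanMin (none, none) with
  | (none, _) => none
  | (some m, mj) => some ((PySem.List.pyGet? dire (mj.getD 0)).getD "" ++ m)

lemma A_step (f : Nat) (target : List Int) (s m : Int) (hne : target ≠ [0, 0])
    (hx : (2:Int) ^ (s - 1).toNat ∣ PySem.List.pyGetD target 0 0)
    (hy : (2:Int) ^ (s - 1).toNat ∣ PySem.List.pyGetD target 1 0)
    (hsm : ¬ s > m) :
    tryHitF (f + 1) target s m =
      pick4 [tryHitF f [PySem.List.pyGetD target 0 0 - 2 ^ (s - 1).toNat, PySem.List.pyGetD target 1 0] (s + 1) m,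
             tryHitF f [PySem.List.pyGetD target 0 0 + 2 ^ (s - 1).toNat, PySem.List.pyGetD target 1 0] (s + 1) m,
             tryHitF f [PySem.List.pyGetD target 0 0, PySem.List.pyGetD target 1 0 + 2 ^ (s - 1).toNat] (s + 1) m,
             tryHitF f [PySem.List.pyGetD target 0 0, PySem.List.pyGetD target 1 0 - 2 ^ (s - 1).toNat] (s + 1) m] := by
  conv_lhs => rw [tryHitF]
  rw [if_neg hne]
  simp only [pvImp_false _ _ hx, pvImp_false _ _ hy, Bool.or_self, Bool.false_eq_true,
    reduceIte, if_neg hsm]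
  rfl

lemma pick4_none : pick4 [none, none, none, none] = none := by decide
lemma pick4_tE1 : pick4 [some "", none, none, none] = some "E" := by decide
lemma pick4_tE2 : pick4 [some "", some "E", none, none] = some "E" := by decide
lemma pick4_tW1 : pick4 [none, some "", none, none] = some "W" := by decide
lemma pick4_tW2 : pick4 [some "W", some "", none, none] = some "W" := by decide
lemma pick4_tN1 : pick4 [none, none, none, some ""] = some "N" := by decide
lemma pick4_tN2 : pick4 [none, none, some "N", some ""] = some "N" := by decide
lemma pick4_tS1 : pick4 [none, none, some "", none] = some "S" := by decide
lemma pick4_tS2 : pick4 [none, none, some "", some "S"] = some "S" := by decide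

lemma pick4_E (r : String) : pick4 [some r, none, none, none] = some ("E" ++ r) := by
  simp [pick4, scanMin, dire, PySem.List.enumerate]
lemma pick4_W (r : String) : pick4 [none, some r, none, none] = some ("W" ++ r) := by
  simp [pick4, scanMin, dire, PySem.List.enumerate]
lemma pick4_N (r : String) : pick4 [none, none, none, some r] = some ("N" ++ r) := by
  simp [pick4, scanMin, dire, PySem.List.enumerate]
lemma pick4_S (r : String) : pick4 [none, none, some r, none] = some ("S" ++ r) := by
  simp [pick4, scanMin, dire, PySem.List.enumerate]

lemma pvPow_pos (k : Nat) : (0:Int) < 2 ^ k := by positivity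

lemma pvMod2 (z : Int) : PySem.Int.mod z 2 = z % 2 :=
  PySem.Int.mod_eq_emod_of_pos (by norm_num)

lemma pvModMul (k : Nat) (z : Int) : PySem.Int.mod (2 ^ k * z) (2 ^ k) = 0 :=
  (PySem.Int.mod_eq_zero_iff_dvd _ _).mpr ⟨z, rfl⟩

lemma pvFdivMul (k : Nat) (z : Int) : PySem.Int.floordiv (2 ^ k * z) (2 ^ k) = z := by
  rw [PySem.Int.floordiv_eq_ediv_of_pos (pvPow_pos k),
    Int.mul_ediv_cancel_left z (ne_of_gt (pvPow_pos k))]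

lemma pvFdivScale (k : Nat) (z : Int) :
    PySem.Int.floordiv (2 ^ k * z) (2 * 2 ^ k) = z / 2 := by
  rw [PySem.Int.floordiv_eq_ediv_of_pos (by positivity),
    show (2:Int) * 2 ^ k = 2 ^ k * 2 from mul_comm _ _,
    Int.mul_ediv_mul_of_pos _ _ (pvPow_pos k)]

lemma pvFdivShift (k : Nat) (z : Int) :
    PySem.Int.floordiv (2 ^ k * z - 2 ^ k) (2 * 2 ^ k) = (z - 1) / 2 := by
  rw [show (2:Int) ^ k * z - 2 ^ k = 2 ^ k * (z - 1) from by ring, pvFdivScale]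

lemma pvMulEqZero (k : Nat) (z : Int) : (2 ^ k * z = 0) ↔ z = 0 := by
  constructor
  · intro h; rcases mul_eq_zero.mp h with h | h
    · exact absurd h (ne_of_gt (pvPow_pos k))
    · exact h
  · rintro rfl; ring

lemma pvMulEqSelf (k : Nat) (z : Int) : (2 ^ k * z = 2 ^ k) ↔ z = 1 := by
  constructor
  · intro h
    have := mul_left_cancel₀ (ne_of_gt (pvPow_pos k)) (h.trans (mul_one _).symm)
    exact this
  · rintro rfl; ring

lemma pvMulEqNegSelf (k : Nat) (z : Int) : (2 ^ k * z = -(2 ^ k)) ↔ z = -1 := by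
  constructor
  · intro h
    have h2 : (2:Int) ^ k * z = 2 ^ k * (-1) := by rw [h]; ring
    exact mul_left_cancel₀ (ne_of_gt (pvPow_pos k)) h2
  · rintro rfl; ring

lemma Alt_zero (f : Nat) (target : List Int) (s m : Int)
    (h0 : PySem.List.pyGetD target 0 0 = 0) (h1 : PySem.List.pyGetD target 1 0 = 0) :
    tryHitAltF f target s m = some "" := by
  rw [tryHitAltF]; rw [h0, h1]; rfl

lemma Alt_gt (f : Nat) (target : List Int) (s m : Int)
    (hne2 : ¬ (PySem.List.pyGetD target 0 0 = 0 ∧ PySem.List.pyGetD target 1 0 = 0))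
    (hgt : m < s) : tryHitAltF f target s m = none := by
  rw [tryHitAltF]
  simp only [if_neg hne2, if_pos (show s > m from hgt)]
  split <;> rfl

lemma Alt_guard (f : Nat) (target : List Int) (s m : Int)
    (hne2 : ¬ (PySem.List.pyGetD target 0 0 = 0 ∧ PySem.List.pyGetD target 1 0 = 0))
    (h : ¬ (2:Int) ^ (s - 1).toNat ∣ PySem.List.pyGetD target 0 0 ∨
         ¬ (2:Int) ^ (s - 1).toNat ∣ PySem.List.pyGetD target 1 0) :
    tryHitAltF f target s m = none := by
  rw [tryHitAltF]
  have hc : PySem.Int.mod (PySem.List.pyGetD target 0 0) (2 ^ (s - 1).toNat) ≠ 0 ∨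
      PySem.Int.mod (PySem.List.pyGetD target 1 0) (2 ^ (s - 1).toNat) ≠ 0 := by
    rcases h with h | h
    · left; rw [Ne, PySem.Int.mod_eq_zero_iff_dvd]; exact h
    · right; rw [Ne, PySem.Int.mod_eq_zero_iff_dvd]; exact h
  simp only [if_neg hne2, if_pos hc]

lemma Alt_step (f : Nat) (target : List Int) (s m : Int) (p q : Int)
    (hxp : PySem.List.pyGetD target 0 0 = 2 ^ (s - 1).toNat * p)
    (hyq : PySem.List.pyGetD target 1 0 = 2 ^ (s - 1).toNat * q)
    (hne : ¬ (p = 0 ∧ q = 0)) (hsm : ¬ s > m) :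
    tryHitAltF (f + 1) target s m =
      (if p % 2 = q % 2 then none
       else if p % 2 = 1 then
         if q = 0 ∧ p = 1 then some "E"
         else if q = 0 ∧ p = -1 then some "W"
         else if ((p - 1) / 2 + q / 2) % 2 = 1 then
           match tryHitAltF f [2 ^ (s - 1).toNat * p - 2 ^ (s - 1).toNat, 2 ^ (s - 1).toNat * q] (s + 1) m with
           | none => none
           | some rest => some ("E" ++ rest)
         else
           match tryHitAltF f [2 ^ (s - 1).toNat * p + 2 ^ (s - 1).toNat, 2 ^ (s - 1).toNat * q] (s + 1) m with
           | none => none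
           | some rest => some ("W" ++ rest)
       else
         if p = 0 ∧ q = 1 then some "N"
         else if p = 0 ∧ q = -1 then some "S"
         else if ((q - 1) / 2 + p / 2) % 2 = 1 then
           match tryHitAltF f [2 ^ (s - 1).toNat * p, 2 ^ (s - 1).toNat * q - 2 ^ (s - 1).toNat] (s + 1) m with
           | none => none
           | some rest => some ("N" ++ rest)
         else
           match tryHitAltF f [2 ^ (s - 1).toNat * p, 2 ^ (s - 1).toNat * q + 2 ^ (s - 1).toNat] (s + 1) m with
           | none => none
           | some rest => some ("S" ++ rest)) := by
  conv_lhs => rw [tryHitAltF]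
  rw [hxp, hyq]
  simp only [pvModMul, ne_eq, not_true_eq_false, or_self, if_false,
    if_neg hsm, pvFdivMul, pvMod2, pvFdivScale, pvFdivShift, pvMulEqZero, pvMulEqSelf,
    pvMulEqNegSelf]
  rw [if_neg hne]

lemma Alt_dead (f : Nat) (target : List Int) (s m : Int) (p q : Int)
    (hxp : PySem.List.pyGetD target 0 0 = 2 ^ (s - 1).toNat * p)
    (hyq : PySem.List.pyGetD target 1 0 = 2 ^ (s - 1).toNat * q)
    (hne : ¬ (p = 0 ∧ q = 0)) (hpq : p % 2 = q % 2) :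
    tryHitAltF f target s m = none := by
  rw [tryHitAltF]
  rw [hxp, hyq]
  have hne' : ¬ (2 ^ (s-1).toNat * p = 0 ∧ 2 ^ (s-1).toNat * q = 0) := by
    simp only [pvMulEqZero]; exact hne
  simp only [if_neg hne', pvModMul, ne_eq, not_true_eq_false, or_self, if_false,
    pvFdivMul, pvMod2, if_pos hpq]
  split <;> rfl

lemma Alt_oneE (f : Nat) (s m : Int) (hsm : ¬ s > m) :
    tryHitAltF (f + 1) [(2:Int) ^ (s - 1).toNat, 0] s m = some "E" := by
  have h := Alt_step f [(2:Int) ^ (s - 1).toNat, 0] s m 1 0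
    (by rw [pvGetD_zero]; ring) (by rw [pvGetD_one]; ring) (by simp) hsm
  rw [h]; norm_num

lemma Alt_oneW (f : Nat) (s m : Int) (hsm : ¬ s > m) :
    tryHitAltF (f + 1) [-((2:Int) ^ (s - 1).toNat), 0] s m = some "W" := by
  have h := Alt_step f [-((2:Int) ^ (s - 1).toNat), 0] s m (-1) 0
    (by rw [pvGetD_zero]; ring) (by rw [pvGetD_one]; ring) (by simp) hsm
  rw [h]; norm_num

lemma Alt_oneN (f : Nat) (s m : Int) (hsm : ¬ s > m) :
    tryHitAltF (f + 1) [0, (2:Int) ^ (s - 1).toNat] s m = some "N" := by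
  have h := Alt_step f [0, (2:Int) ^ (s - 1).toNat] s m 0 1
    (by rw [pvGetD_zero]; ring) (by rw [pvGetD_one]; ring) (by simp) hsm
  rw [h]; norm_num

lemma Alt_oneS (f : Nat) (s m : Int) (hsm : ¬ s > m) :
    tryHitAltF (f + 1) [0, -((2:Int) ^ (s - 1).toNat)] s m = some "S" := by
  have h := Alt_step f [0, -((2:Int) ^ (s - 1).toNat)] s m 0 (-1)
    (by rw [pvGetD_zero]; ring) (by rw [pvGetD_one]; ring) (by simp) hsm
  rw [h]; norm_num

lemma pvPairNe (a b : Int) (h : ¬ (a = 0 ∧ b = 0)) : ([a, b] : List Int) ≠ [0, 0] := by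
  intro he; apply h; simpa using he

lemma A_guard2 (f : Nat) (a b s m : Int) (hne : ¬ (a = 0 ∧ b = 0))
    (h : ¬ (2:Int) ^ (s - 1).toNat ∣ a ∨ ¬ (2:Int) ^ (s - 1).toNat ∣ b) :
    tryHitF f [a, b] s m = none := by
  apply A_guard f [a, b] s m (pvPairNe a b hne)
  rwa [pvGetD_zero, pvGetD_one]

lemma pvNotDvdOdd (k : Nat) (z : Int) (hz : z % 2 = 1) :
    ¬ (2:Int) ^ (k + 1) ∣ 2 ^ k * z := by
  rw [pow_succ, mul_dvd_mul_iff_left (a := (2:Int) ^ k) (ne_of_gt (pvPow_pos k))]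
  omega

lemma mainEq (n : Nat) : ∀ (fa fb : Nat) (target : List Int) (s m : Int), 1 ≤ s →
    (m - s + 1).toNat ≤ n → (m - s + 1).toNat ≤ fa → (m - s + 1).toNat ≤ fb →
    ¬ (PySem.List.pyGetD target 0 0 = 0 ∧ PySem.List.pyGetD target 1 0 = 0) →
    tryHitF fa target s m = tryHitAltF fb target s m := by
  induction n with
  | zero =>
    intro fa fb target s m hs hn hfa hfb hne2
    have hgt : m < s := by omega
    have hneT : target ≠ [0, 0] := by
      rintro rfl; exact hne2 ⟨pvGetD_zero 0 0 [0], pvGetD_one 0 0 0 []⟩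
    rw [A_gt _ _ _ _ hneT hgt, Alt_gt _ _ _ _ hne2 hgt]
  | succ n ih =>
    intro fa fb target s m hs hn hfa hfb hne2
    have hneT : target ≠ [0, 0] := by
      rintro rfl; exact hne2 ⟨pvGetD_zero 0 0 [0], pvGetD_one 0 0 0 []⟩
    by_cases hgt : m < s
    · rw [A_gt _ _ _ _ hneT hgt, Alt_gt _ _ _ _ hne2 hgt]
    have hsm : ¬ s > m := hgt
    by_cases hdx : (2:Int) ^ (s - 1).toNat ∣ PySem.List.pyGetD target 0 0
    case neg => rw [A_guard _ _ _ _ hneT (Or.inl hdx), Alt_guard _ _ _ _ hne2 (Or.inl hdx)]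
    by_cases hdy : (2:Int) ^ (s - 1).toNat ∣ PySem.List.pyGetD target 1 0
    case neg => rw [A_guard _ _ _ _ hneT (Or.inr hdy), Alt_guard _ _ _ _ hne2 (Or.inr hdy)]
    obtain ⟨p, hxp⟩ := hdx
    obtain ⟨q, hyq⟩ := hdy
    have hb1 : 1 ≤ (m - s + 1).toNat := by omega
    obtain ⟨fa', rfl⟩ : ∃ fa', fa = fa' + 1 := ⟨fa - 1, by omega⟩
    obtain ⟨fb', rfl⟩ : ∃ fb', fb = fb' + 1 := ⟨fb - 1, by omega⟩
    have hne : ¬ (p = 0 ∧ q = 0) := by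
      rintro ⟨rfl, rfl⟩
      exact hne2 ⟨by rw [hxp]; ring, by rw [hyq]; ring⟩
    rw [A_step fa' target s m hneT ⟨p, hxp⟩ ⟨q, hyq⟩ hsm,
        Alt_step fb' target s m p q hxp hyq hne hsm]
    rw [hxp, hyq]
    set k := (s - 1).toNat with hkdef
    have hk1 : ((s + 1) - 1).toNat = k + 1 := by rw [hkdef]; omega
    have hb' : (m - (s + 1) + 1).toNat ≤ n := by omega
    have hfa' : (m - (s + 1) + 1).toNat ≤ fa' := by omega
    have hfb' : (m - (s + 1) + 1).toNat ≤ fb' := by omega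
    have hs1 : (1:Int) ≤ s + 1 := by omega
    rcases Int.emod_two_eq p with hp | hp <;> rcases Int.emod_two_eq q with hq | hq
    · -- p even, q even: everything dead
      rw [if_pos (hp.trans hq.symm)]
      have cE : tryHitF fa' [2 ^ k * p - 2 ^ k, 2 ^ k * q] (s + 1) m = none := by
        rw [show (2:Int) ^ k * p - 2 ^ k = 2 ^ k * (p - 1) from by ring]
        exact A_guard2 _ _ _ _ _
          (by rintro ⟨h1, h2⟩; rw [pvMulEqZero] at h1; omega)
          (Or.inl (by rw [hk1]; exact pvNotDvdOdd k _ (by omega)))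
      have cW : tryHitF fa' [2 ^ k * p + 2 ^ k, 2 ^ k * q] (s + 1) m = none := by
        rw [show (2:Int) ^ k * p + 2 ^ k = 2 ^ k * (p + 1) from by ring]
        exact A_guard2 _ _ _ _ _
          (by rintro ⟨h1, h2⟩; rw [pvMulEqZero] at h1; omega)
          (Or.inl (by rw [hk1]; exact pvNotDvdOdd k _ (by omega)))
      have cN : tryHitF fa' [2 ^ k * p, 2 ^ k * q + 2 ^ k] (s + 1) m = none := by
        rw [show (2:Int) ^ k * q + 2 ^ k = 2 ^ k * (q + 1) from by ring]
        exact A_guard2 _ _ _ _ _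
          (by rintro ⟨h1, h2⟩; rw [pvMulEqZero] at h2; omega)
          (Or.inr (by rw [hk1]; exact pvNotDvdOdd k _ (by omega)))
      have cS : tryHitF fa' [2 ^ k * p, 2 ^ k * q - 2 ^ k] (s + 1) m = none := by
        rw [show (2:Int) ^ k * q - 2 ^ k = 2 ^ k * (q - 1) from by ring]
        exact A_guard2 _ _ _ _ _
          (by rintro ⟨h1, h2⟩; rw [pvMulEqZero] at h2; omega)
          (Or.inr (by rw [hk1]; exact pvNotDvdOdd k _ (by omega)))
      rw [cE, cW, cN, cS, pick4_none]
    · -- p even, q odd: the move is forced onto the y axis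
      obtain ⟨t, rfl⟩ : ∃ t, p = 2 * t := ⟨p / 2, by omega⟩
      obtain ⟨u, rfl⟩ : ∃ u, q = 2 * u + 1 := ⟨(q - 1) / 2, by omega⟩
      rw [if_neg (show ¬ (2 * t) % 2 = (2 * u + 1) % 2 from by omega),
          if_neg (show ¬ (2 * t) % 2 = 1 from by omega)]
      have cE : tryHitF fa' [2 ^ k * (2 * t) - 2 ^ k, 2 ^ k * (2 * u + 1)] (s + 1) m = none := by
        rw [show (2:Int) ^ k * (2 * t) - 2 ^ k = 2 ^ k * (2 * t - 1) from by ring]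
        exact A_guard2 _ _ _ _ _
          (by rintro ⟨h1, h2⟩; rw [pvMulEqZero] at h2; omega)
          (Or.inl (by rw [hk1]; exact pvNotDvdOdd k _ (by omega)))
      have cW : tryHitF fa' [2 ^ k * (2 * t) + 2 ^ k, 2 ^ k * (2 * u + 1)] (s + 1) m = none := by
        rw [show (2:Int) ^ k * (2 * t) + 2 ^ k = 2 ^ k * (2 * t + 1) from by ring]
        exact A_guard2 _ _ _ _ _
          (by rintro ⟨h1, h2⟩; rw [pvMulEqZero] at h2; omega)
          (Or.inl (by rw [hk1]; exact pvNotDvdOdd k _ (by omega)))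
      rw [show ((2 * u + 1 - 1) / 2 + 2 * t / 2) = u + t from by omega]
      by_cases hT1 : t = 0 ∧ u = 0
      · obtain ⟨rfl, rfl⟩ := hT1
        rw [if_pos (show 2 * (0:Int) = 0 ∧ 2 * (0:Int) + 1 = 1 from by norm_num)]
        rw [cE, cW]
        rw [show (2:Int) ^ k * (2 * 0 + 1) - 2 ^ k = 0 from by ring,
            show (2:Int) ^ k * (2 * 0) = 0 from by ring]
        rw [show (2:Int) ^ k * (2 * 0 + 1) + 2 ^ k = 2 ^ ((s + 1) - 1).toNat from by
              rw [hk1, pow_succ]; ring]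
        rw [A_zero]
        by_cases hgt2 : m < s + 1
        · rw [A_gt _ _ _ _ (pvPairNe _ _ (by
              rintro ⟨h1, h2⟩; have := pvPow_pos (((s + 1) - 1).toNat); omega)) hgt2,
            pick4_tN1]
        · obtain ⟨f2, hf2⟩ : ∃ f2, (m - (s + 1) + 1).toNat = f2 + 1 := ⟨(m - (s + 1) + 1).toNat - 1, by omega⟩
          rw [ih fa' ((m - (s + 1) + 1).toNat) [(0:Int), 2 ^ ((s + 1) - 1).toNat] (s + 1) m hs1 hb' hfa' le_rfl
              (by rw [pvGetD_zero, pvGetD_one]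
                  rintro ⟨h1, h2⟩; have := pvPow_pos (((s + 1) - 1).toNat); omega)]
          rw [hf2, Alt_oneN f2 (s + 1) m (by omega), pick4_tN2]
      · by_cases hT2 : t = 0 ∧ u = -1
        · obtain ⟨rfl, rfl⟩ := hT2
          rw [if_neg (show ¬ (2 * (0:Int) = 0 ∧ 2 * (-1:Int) + 1 = 1) from by norm_num),
              if_pos (show 2 * (0:Int) = 0 ∧ 2 * (-1:Int) + 1 = -1 from by norm_num)]
          rw [cE, cW]
          rw [show (2:Int) ^ k * (2 * (-1) + 1) + 2 ^ k = 0 from by ring,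
              show (2:Int) ^ k * (2 * 0) = 0 from by ring]
          rw [show (2:Int) ^ k * (2 * (-1) + 1) - 2 ^ k = -(2 ^ ((s + 1) - 1).toNat) from by
                rw [hk1, pow_succ]; ring]
          rw [A_zero]
          by_cases hgt2 : m < s + 1
          · rw [A_gt _ _ _ _ (pvPairNe _ _ (by
                rintro ⟨h1, h2⟩; have := pvPow_pos (((s + 1) - 1).toNat); omega)) hgt2,
              pick4_tS1]
          · obtain ⟨f2, hf2⟩ : ∃ f2, (m - (s + 1) + 1).toNat = f2 + 1 := ⟨(m - (s + 1) + 1).toNat - 1, by omega⟩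
            rw [ih fa' ((m - (s + 1) + 1).toNat) [(0:Int), -((2:Int) ^ ((s + 1) - 1).toNat)] (s + 1) m hs1 hb' hfa' le_rfl
                (by rw [pvGetD_zero, pvGetD_one]
                    rintro ⟨h1, h2⟩; have := pvPow_pos (((s + 1) - 1).toNat); omega)]
            rw [hf2, Alt_oneS f2 (s + 1) m (by omega), pick4_tS2]
        · rw [if_neg (show ¬ (2 * t = 0 ∧ 2 * u + 1 = 1) from by omega),
              if_neg (show ¬ (2 * t = 0 ∧ 2 * u + 1 = -1) from by omega)]
          rcases Int.emod_two_eq (u + t) with hpar | hpar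
          · -- chosen move is S (y + jump)
            rw [if_neg (show ¬ (u + t) % 2 = 1 from by omega)]
            have cYm : tryHitF fa' [2 ^ k * (2 * t), 2 ^ k * (2 * u + 1) - 2 ^ k] (s + 1) m = none := by
              rw [ih fa' fb' _ (s + 1) m hs1 hb' hfa' hfb'
                  (by rw [pvGetD_zero, pvGetD_one]
                      rintro ⟨h1, h2⟩
                      rw [show (2:Int) ^ k * (2 * t) = 2 ^ (k + 1) * t from by rw [pow_succ]; ring,
                        pvMulEqZero] at h1
                      rw [show (2:Int) ^ k * (2 * u + 1) - 2 ^ k = 2 ^ (k + 1) * u from by rw [pow_succ]; ring,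
                        pvMulEqZero] at h2
                      exact hT1 ⟨h1, h2⟩)]
              exact Alt_dead fb' _ (s + 1) m t u
                (by rw [pvGetD_zero, hk1, pow_succ]; ring)
                (by rw [pvGetD_one, hk1, pow_succ]; ring)
                (by rintro ⟨rfl, rfl⟩; exact hT1 ⟨rfl, rfl⟩)
                (by omega)
            have cYp : tryHitF fa' [2 ^ k * (2 * t), 2 ^ k * (2 * u + 1) + 2 ^ k] (s + 1) m
                = tryHitAltF fb' [2 ^ k * (2 * t), 2 ^ k * (2 * u + 1) + 2 ^ k] (s + 1) m := by
              refine ih fa' fb' _ (s + 1) m hs1 hb' hfa' hfb' ?_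
              rw [pvGetD_zero, pvGetD_one]
              rintro ⟨h1, h2⟩
              rw [show (2:Int) ^ k * (2 * t) = 2 ^ (k + 1) * t from by rw [pow_succ]; ring,
                pvMulEqZero] at h1
              rw [show (2:Int) ^ k * (2 * u + 1) + 2 ^ k = 2 ^ (k + 1) * (u + 1) from by rw [pow_succ]; ring,
                pvMulEqZero] at h2
              exact hT2 ⟨h1, by omega⟩
            rw [cE, cW, cYm, cYp]
            cases hr : tryHitAltF fb' [2 ^ k * (2 * t), 2 ^ k * (2 * u + 1) + 2 ^ k] (s + 1) m with
            | none => rw [pick4_none]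
            | some r => rw [pick4_S]
          · -- chosen move is N (y - jump)
            rw [if_pos hpar]
            have cYp : tryHitF fa' [2 ^ k * (2 * t), 2 ^ k * (2 * u + 1) + 2 ^ k] (s + 1) m = none := by
              rw [ih fa' fb' _ (s + 1) m hs1 hb' hfa' hfb'
                  (by rw [pvGetD_zero, pvGetD_one]
                      rintro ⟨h1, h2⟩
                      rw [show (2:Int) ^ k * (2 * t) = 2 ^ (k + 1) * t from by rw [pow_succ]; ring,
                        pvMulEqZero] at h1
                      rw [show (2:Int) ^ k * (2 * u + 1) + 2 ^ k = 2 ^ (k + 1) * (u + 1) from by rw [pow_succ]; ring,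
                        pvMulEqZero] at h2
                      exact hT2 ⟨h1, by omega⟩)]
              exact Alt_dead fb' _ (s + 1) m t (u + 1)
                (by rw [pvGetD_zero, hk1, pow_succ]; ring)
                (by rw [pvGetD_one, hk1, pow_succ]; ring)
                (by rintro ⟨rfl, hu1⟩; exact hT2 ⟨rfl, by omega⟩)
                (by omega)
            have cYm : tryHitF fa' [2 ^ k * (2 * t), 2 ^ k * (2 * u + 1) - 2 ^ k] (s + 1) m
                = tryHitAltF fb' [2 ^ k * (2 * t), 2 ^ k * (2 * u + 1) - 2 ^ k] (s + 1) m := by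
              refine ih fa' fb' _ (s + 1) m hs1 hb' hfa' hfb' ?_
              rw [pvGetD_zero, pvGetD_one]
              rintro ⟨h1, h2⟩
              rw [show (2:Int) ^ k * (2 * t) = 2 ^ (k + 1) * t from by rw [pow_succ]; ring,
                pvMulEqZero] at h1
              rw [show (2:Int) ^ k * (2 * u + 1) - 2 ^ k = 2 ^ (k + 1) * u from by rw [pow_succ]; ring,
                pvMulEqZero] at h2
              exact hT1 ⟨h1, h2⟩
            rw [cE, cW, cYp, cYm]
            cases hr : tryHitAltF fb' [2 ^ k * (2 * t), 2 ^ k * (2 * u + 1) - 2 ^ k] (s + 1) m with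
            | none => rw [pick4_none]
            | some r => rw [pick4_N]
    · -- p odd, q even: the move is forced onto the x axis
      obtain ⟨t, rfl⟩ : ∃ t, p = 2 * t + 1 := ⟨(p - 1) / 2, by omega⟩
      obtain ⟨u, rfl⟩ : ∃ u, q = 2 * u := ⟨q / 2, by omega⟩
      rw [if_neg (show ¬ (2 * t + 1) % 2 = (2 * u) % 2 from by omega),
          if_pos (show (2 * t + 1) % 2 = 1 from by omega)]
      have cN : tryHitF fa' [2 ^ k * (2 * t + 1), 2 ^ k * (2 * u) + 2 ^ k] (s + 1) m = none := by
        rw [show (2:Int) ^ k * (2 * u) + 2 ^ k = 2 ^ k * (2 * u + 1) from by ring]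
        exact A_guard2 _ _ _ _ _
          (by rintro ⟨h1, h2⟩; rw [pvMulEqZero] at h1; omega)
          (Or.inl (by rw [hk1]; exact pvNotDvdOdd k _ (by omega)))
      have cS : tryHitF fa' [2 ^ k * (2 * t + 1), 2 ^ k * (2 * u) - 2 ^ k] (s + 1) m = none := by
        rw [show (2:Int) ^ k * (2 * u) - 2 ^ k = 2 ^ k * (2 * u - 1) from by ring]
        exact A_guard2 _ _ _ _ _
          (by rintro ⟨h1, h2⟩; rw [pvMulEqZero] at h1; omega)
          (Or.inl (by rw [hk1]; exact pvNotDvdOdd k _ (by omega)))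
      rw [show ((2 * t + 1 - 1) / 2 + 2 * u / 2) = t + u from by omega]
      by_cases hT1 : u = 0 ∧ t = 0
      · obtain ⟨rfl, rfl⟩ := hT1
        rw [if_pos (show 2 * (0:Int) = 0 ∧ 2 * (0:Int) + 1 = 1 from by norm_num)]
        rw [cN, cS]
        rw [show (2:Int) ^ k * (2 * 0 + 1) - 2 ^ k = 0 from by ring,
            show (2:Int) ^ k * (2 * 0) = 0 from by ring]
        rw [show (2:Int) ^ k * (2 * 0 + 1) + 2 ^ k = 2 ^ ((s + 1) - 1).toNat from by
              rw [hk1, pow_succ]; ring]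
        rw [A_zero]
        by_cases hgt2 : m < s + 1
        · rw [A_gt _ _ _ _ (pvPairNe _ _ (by
              rintro ⟨h1, h2⟩; have := pvPow_pos (((s + 1) - 1).toNat); omega)) hgt2,
            pick4_tE1]
        · obtain ⟨f2, hf2⟩ : ∃ f2, (m - (s + 1) + 1).toNat = f2 + 1 := ⟨(m - (s + 1) + 1).toNat - 1, by omega⟩
          rw [ih fa' ((m - (s + 1) + 1).toNat) [(2:Int) ^ ((s + 1) - 1).toNat, 0] (s + 1) m hs1 hb' hfa' le_rfl
              (by rw [pvGetD_zero, pvGetD_one]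
                  rintro ⟨h1, h2⟩; have := pvPow_pos (((s + 1) - 1).toNat); omega)]
          rw [hf2, Alt_oneE f2 (s + 1) m (by omega), pick4_tE2]
      · by_cases hT2 : u = 0 ∧ t = -1
        · obtain ⟨rfl, rfl⟩ := hT2
          rw [if_neg (show ¬ (2 * (0:Int) = 0 ∧ 2 * (-1:Int) + 1 = 1) from by norm_num),
              if_pos (show 2 * (0:Int) = 0 ∧ 2 * (-1:Int) + 1 = -1 from by norm_num)]
          rw [cN, cS]
          rw [show (2:Int) ^ k * (2 * (-1) + 1) + 2 ^ k = 0 from by ring,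
              show (2:Int) ^ k * (2 * 0) = 0 from by ring]
          rw [show (2:Int) ^ k * (2 * (-1) + 1) - 2 ^ k = -(2 ^ ((s + 1) - 1).toNat) from by
                rw [hk1, pow_succ]; ring]
          rw [A_zero]
          by_cases hgt2 : m < s + 1
          · rw [A_gt _ _ _ _ (pvPairNe _ _ (by
                rintro ⟨h1, h2⟩; have := pvPow_pos (((s + 1) - 1).toNat); omega)) hgt2,
              pick4_tW1]
          · obtain ⟨f2, hf2⟩ : ∃ f2, (m - (s + 1) + 1).toNat = f2 + 1 := ⟨(m - (s + 1) + 1).toNat - 1, by omega⟩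
            rw [ih fa' ((m - (s + 1) + 1).toNat) [-((2:Int) ^ ((s + 1) - 1).toNat), 0] (s + 1) m hs1 hb' hfa' le_rfl
                (by rw [pvGetD_zero, pvGetD_one]
                    rintro ⟨h1, h2⟩; have := pvPow_pos (((s + 1) - 1).toNat); omega)]
            rw [hf2, Alt_oneW f2 (s + 1) m (by omega), pick4_tW2]
        · rw [if_neg (show ¬ (2 * u = 0 ∧ 2 * t + 1 = 1) from by omega),
              if_neg (show ¬ (2 * u = 0 ∧ 2 * t + 1 = -1) from by omega)]
          rcases Int.emod_two_eq (t + u) with hpar | hpar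
          · -- chosen move is W (x + jump)
            rw [if_neg (show ¬ (t + u) % 2 = 1 from by omega)]
            have cXm : tryHitF fa' [2 ^ k * (2 * t + 1) - 2 ^ k, 2 ^ k * (2 * u)] (s + 1) m = none := by
              rw [ih fa' fb' _ (s + 1) m hs1 hb' hfa' hfb'
                  (by rw [pvGetD_zero, pvGetD_one]
                      rintro ⟨h1, h2⟩
                      rw [show (2:Int) ^ k * (2 * t + 1) - 2 ^ k = 2 ^ (k + 1) * t from by rw [pow_succ]; ring,
                        pvMulEqZero] at h1
                      rw [show (2:Int) ^ k * (2 * u) = 2 ^ (k + 1) * u from by rw [pow_succ]; ring,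
                        pvMulEqZero] at h2
                      exact hT1 ⟨h2, h1⟩)]
              exact Alt_dead fb' _ (s + 1) m t u
                (by rw [pvGetD_zero, hk1, pow_succ]; ring)
                (by rw [pvGetD_one, hk1, pow_succ]; ring)
                (by rintro ⟨rfl, rfl⟩; exact hT1 ⟨rfl, rfl⟩)
                (by omega)
            have cXp : tryHitF fa' [2 ^ k * (2 * t + 1) + 2 ^ k, 2 ^ k * (2 * u)] (s + 1) m
                = tryHitAltF fb' [2 ^ k * (2 * t + 1) + 2 ^ k, 2 ^ k * (2 * u)] (s + 1) m := by
              refine ih fa' fb' _ (s + 1) m hs1 hb' hfa' hfb' ?_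
              rw [pvGetD_zero, pvGetD_one]
              rintro ⟨h1, h2⟩
              rw [show (2:Int) ^ k * (2 * t + 1) + 2 ^ k = 2 ^ (k + 1) * (t + 1) from by rw [pow_succ]; ring,
                pvMulEqZero] at h1
              rw [show (2:Int) ^ k * (2 * u) = 2 ^ (k + 1) * u from by rw [pow_succ]; ring,
                pvMulEqZero] at h2
              exact hT2 ⟨h2, by omega⟩
            rw [cXm, cN, cS, cXp]
            cases hr : tryHitAltF fb' [2 ^ k * (2 * t + 1) + 2 ^ k, 2 ^ k * (2 * u)] (s + 1) m with
            | none => rw [pick4_none]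
            | some r => rw [pick4_W]
          · -- chosen move is E (x - jump)
            rw [if_pos hpar]
            have cXp : tryHitF fa' [2 ^ k * (2 * t + 1) + 2 ^ k, 2 ^ k * (2 * u)] (s + 1) m = none := by
              rw [ih fa' fb' _ (s + 1) m hs1 hb' hfa' hfb'
                  (by rw [pvGetD_zero, pvGetD_one]
                      rintro ⟨h1, h2⟩
                      rw [show (2:Int) ^ k * (2 * t + 1) + 2 ^ k = 2 ^ (k + 1) * (t + 1) from by rw [pow_succ]; ring,
                        pvMulEqZero] at h1
                      rw [show (2:Int) ^ k * (2 * u) = 2 ^ (k + 1) * u from by rw [pow_succ]; ring,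
                        pvMulEqZero] at h2
                      exact hT2 ⟨h2, by omega⟩)]
              exact Alt_dead fb' _ (s + 1) m (t + 1) u
                (by rw [pvGetD_zero, hk1, pow_succ]; ring)
                (by rw [pvGetD_one, hk1, pow_succ]; ring)
                (by rintro ⟨ht1, rfl⟩; exact hT2 ⟨rfl, by omega⟩)
                (by omega)
            have cXm : tryHitF fa' [2 ^ k * (2 * t + 1) - 2 ^ k, 2 ^ k * (2 * u)] (s + 1) m
                = tryHitAltF fb' [2 ^ k * (2 * t + 1) - 2 ^ k, 2 ^ k * (2 * u)] (s + 1) m := by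
              refine ih fa' fb' _ (s + 1) m hs1 hb' hfa' hfb' ?_
              rw [pvGetD_zero, pvGetD_one]
              rintro ⟨h1, h2⟩
              rw [show (2:Int) ^ k * (2 * t + 1) - 2 ^ k = 2 ^ (k + 1) * t from by rw [pow_succ]; ring,
                pvMulEqZero] at h1
              rw [show (2:Int) ^ k * (2 * u) = 2 ^ (k + 1) * u from by rw [pow_succ]; ring,
                pvMulEqZero] at h2
              exact hT1 ⟨h2, h1⟩
            rw [cXm, cN, cS, cXp]
            cases hr : tryHitAltF fb' [2 ^ k * (2 * t + 1) - 2 ^ k, 2 ^ k * (2 * u)] (s + 1) m with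
            | none => rw [pick4_none]
            | some r => rw [pick4_E]
    · -- p odd, q odd: everything dead
      rw [if_pos (hp.trans hq.symm)]
      have cE : tryHitF fa' [2 ^ k * p - 2 ^ k, 2 ^ k * q] (s + 1) m = none :=
        A_guard2 _ _ _ _ _
          (by rintro ⟨h1, h2⟩; rw [pvMulEqZero] at h2; omega)
          (Or.inr (by rw [hk1]; exact pvNotDvdOdd k _ (by omega)))
      have cW : tryHitF fa' [2 ^ k * p + 2 ^ k, 2 ^ k * q] (s + 1) m = none :=
        A_guard2 _ _ _ _ _
          (by rintro ⟨h1, h2⟩; rw [pvMulEqZero] at h2; omega)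
          (Or.inr (by rw [hk1]; exact pvNotDvdOdd k _ (by omega)))
      have cN : tryHitF fa' [2 ^ k * p, 2 ^ k * q + 2 ^ k] (s + 1) m = none :=
        A_guard2 _ _ _ _ _
          (by rintro ⟨h1, h2⟩; rw [pvMulEqZero] at h1; omega)
          (Or.inl (by rw [hk1]; exact pvNotDvdOdd k _ (by omega)))
      have cS : tryHitF fa' [2 ^ k * p, 2 ^ k * q - 2 ^ k] (s + 1) m = none :=
        A_guard2 _ _ _ _ _
          (by rintro ⟨h1, h2⟩; rw [pvMulEqZero] at h1; omega)
          (Or.inl (by rw [hk1]; exact pvNotDvdOdd k _ (by omega)))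
      rw [cE, cW, cN, cS, pick4_none]

-- ===== VERDICT (by name: the statement is the Claim_ definition above) =====
theorem tryHit_spec : Claim_unchanged_tryHit := by
  unfold Claim_unchanged_tryHit
  intro target step maxi hDom hPre
  unfold Spec_tryHit
  intro hD
  unfold Pre_tryHit at hPre
  obtain ⟨hlen, hstep⟩ := hPre
  rcases target with _ | ⟨t0, _ | ⟨t1, rest⟩⟩
  · simp at hlen
  · simp at hlen
  by_cases h00 : t0 = 0 ∧ t1 = 0
  · obtain ⟨rfl, rfl⟩ := h00
    rcases rest with _ | ⟨r0, rest⟩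
    · unfold tryHit tryHit_alt
      rw [A_zero, Alt_zero _ _ _ _ (pvGetD_zero 0 0 [0]) (pvGetD_one 0 0 0 [])]
    · exfalso
      apply hD
      unfold D_tryHit
      refine ⟨by simp, rfl, rfl⟩
  · have hs : (1:Int) ≤ step := by
      rcases hstep with hs | he
      · exact hs
      · exact absurd (by simpa using he) (by rintro ⟨h1, h2, h3⟩; exact h00 ⟨h1, h2⟩)
    unfold tryHit tryHit_alt
    exact mainEq ((maxi - step + 1).toNat) _ _ (t0 :: t1 :: rest) step maxi hs
      le_rfl le_rfl le_rfl (by rw [pvGetD_zero, pvGetD_one]; exact h00)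

theorem tryHit_changed : Claim_changed_tryHit := by
  unfold Claim_changed_tryHit; decide

theorem tryHit_tight : Claim_exact_tryHit := by
  unfold Claim_exact_tryHit
  intro target step maxi hDom hPre hD
  unfold Pre_tryHit at hPre
  unfold D_tryHit at hD
  obtain ⟨hlen, hstep⟩ := hPre
  obtain ⟨hlen3, h0, h1⟩ := hD
  rcases target with _ | ⟨t0, _ | ⟨t1, rest⟩⟩
  · simp at hlen
  · simp at hlen
  have ht0 : t0 = 0 := by simpa using h0
  have ht1 : t1 = 0 := by simpa using h1
  subst ht0; subst ht1
  rcases rest with _ | ⟨r0, rest⟩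
  · simp at hlen3
  have hs : (1:Int) ≤ step := by
    rcases hstep with hs | he
    · exact hs
    · simp at he
  have hB : tryHit_alt (0 :: 0 :: r0 :: rest) step maxi = some "" := by
    unfold tryHit_alt
    exact Alt_zero _ _ _ _ (pvGetD_zero 0 0 (0 :: r0 :: rest)) (pvGetD_one 0 0 0 (r0 :: rest))
  rw [hB]
  unfold tryHit
  have hneT : (0 :: 0 :: r0 :: rest : List Int) ≠ [0, 0] := by simp
  by_cases hgt : maxi < step
  · rw [A_gt _ _ _ _ hneT hgt]; simp
  · obtain ⟨f', hf⟩ : ∃ f', (maxi - step + 1).toNat = f' + 1 :=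
      ⟨(maxi - step + 1).toNat - 1, by omega⟩
    rw [hf]
    rw [A_step f' _ step maxi hneT ⟨0, by rw [pvGetD_zero]; ring⟩
      ⟨0, by rw [pvGetD_one]; ring⟩ hgt]
    rw [pvGetD_zero, pvGetD_one]
    set k := (step - 1).toNat with hkdef
    have hk1 : ((step + 1) - 1).toNat = k + 1 := by rw [hkdef]; omega
    have c1 : tryHitF f' [0 - 2 ^ k, 0] (step + 1) maxi = none := by
      rw [show (0:Int) - 2 ^ k = 2 ^ k * (-1) from by ring]
      exact A_guard2 _ _ _ _ _ (by rintro ⟨hh, _⟩; rw [pvMulEqZero] at hh; omega)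
        (Or.inl (by rw [hk1]; exact pvNotDvdOdd k _ (by norm_num)))
    have c2 : tryHitF f' [0 + 2 ^ k, 0] (step + 1) maxi = none := by
      rw [show (0:Int) + 2 ^ k = 2 ^ k * 1 from by ring]
      exact A_guard2 _ _ _ _ _ (by rintro ⟨hh, _⟩; rw [pvMulEqZero] at hh; omega)
        (Or.inl (by rw [hk1]; exact pvNotDvdOdd k _ (by norm_num)))
    have c3 : tryHitF f' [0, 0 + 2 ^ k] (step + 1) maxi = none := by
      rw [show (0:Int) + 2 ^ k = 2 ^ k * 1 from by ring]
      exact A_guard2 _ _ _ _ _ (by rintro ⟨_, hh⟩; rw [pvMulEqZero] at hh; omega)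
        (Or.inr (by rw [hk1]; exact pvNotDvdOdd k _ (by norm_num)))
    have c4 : tryHitF f' [0, 0 - 2 ^ k] (step + 1) maxi = none := by
      rw [show (0:Int) - 2 ^ k = 2 ^ k * (-1) from by ring]
      exact A_guard2 _ _ _ _ _ (by rintro ⟨_, hh⟩; rw [pvMulEqZero] at hh; omega)
        (Or.inr (by rw [hk1]; exact pvNotDvdOdd k _ (by norm_num)))
    rw [c1, c2, c3, c4, pick4_none]
    simp
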